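-- pv_equiv track=rewrite | github.com/Hsu1685/Python-Examples | find-min-divisor-without-repeats/main.py | find_min_divisor_without_repeats
-- ===== SOURCE A (Python) =====
-- def find_min_divisor_without_repeats(arr):
--     divisor = 2
--
--     while True:
--         remainders = set()
--         for num in arr:
--             remainder = num % divisor
--             if remainder in remainders:
--                 break
--             remainders.add(remainder)
--         else:
--             return divisor  # If no remainders repeated, return the divisor
--
--         divisor += 1  # If remainders repeated, increment the divisor and try again
-- ===== SOURCE B (Python) =====
-- def find_min_divisor_without_repeats(arr):
--     # Collect all pairwise absolute differences; a % d == b % d iff d divides a - b,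
--     # so the answer is the first d >= 2 dividing none of them.
--     diffs = set()
--     for i, x in enumerate(arr):
--         for y in arr[i + 1:]:
--             diffs.add(abs(x - y))
--     d = 2
--     while any(diff % d == 0 for diff in diffs):
--         d += 1
--     return d
-- ===== Notes on version B (the rewrite author's own statement) =====
-- stated objective: alternative
-- what changed: Instead of re-scanning remainders into a set for each candidate divisor, B precomputes the set of all pairwise absolute differences once and returns the first d >= 2 that divides none of them (a % d == b % d iff d divides a-b).
import Mathlib
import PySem

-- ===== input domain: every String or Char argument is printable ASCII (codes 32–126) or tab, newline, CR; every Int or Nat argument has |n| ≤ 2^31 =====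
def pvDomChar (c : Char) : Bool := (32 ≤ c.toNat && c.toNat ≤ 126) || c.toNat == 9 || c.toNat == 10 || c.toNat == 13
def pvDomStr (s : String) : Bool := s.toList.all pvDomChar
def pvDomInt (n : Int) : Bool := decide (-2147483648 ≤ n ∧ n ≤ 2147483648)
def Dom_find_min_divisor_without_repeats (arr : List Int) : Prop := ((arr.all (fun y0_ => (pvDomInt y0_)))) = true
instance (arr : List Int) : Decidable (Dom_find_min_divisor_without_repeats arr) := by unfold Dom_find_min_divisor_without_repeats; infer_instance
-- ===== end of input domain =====

-- B rewrites the search: instead of rescanning remainders per divisor, it builds the set of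
-- pairwise absolute differences once and returns the first d ≥ 2 dividing none of them
-- (a % d = b % d iff d ∣ a - b); objective: alternative decomposition, same exact value.
-- Both Python while-loops are unbounded; the ports close them with the fuel pvFuel
-- (max pairwise |difference| + 1), which suffices whenever the Python loops terminate,
-- i.e. on every duplicate-free arr (on arrays with a duplicate element neither Python
-- ever returns, so no return value is claimed or compared there).

-- fuel (totality device only, not part of either algorithm)
def pvMaxDiff : List Int → Nat
  | [] => 0
  | x :: rest => rest.foldl (fun m y => max m (x - y).natAbs) (pvMaxDiff rest)

def pvFuel (arr : List Int) : Nat := pvMaxDiff arr + 1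

-- ===== PORT A =====
-- the for-loop over arr with the running `remainders` set; `false` = the inner `break`
def pvAInner : List Int → Int → PySem.Set Int → Bool
  | [], _, _ => true
  | num :: rest, divisor, remainders =>
      let remainder := PySem.Int.mod num divisor
      if PySem.Set.contains remainders remainder then false
      else pvAInner rest divisor (PySem.Set.add remainders remainder)

-- the `while True` loop
def pvALoop (arr : List Int) (divisor : Int) : Nat → Int
  | 0 => divisor
  | fuel + 1 =>
      if pvAInner arr divisor PySem.Set.empty then divisor
      else pvALoop arr (divisor + 1) fuel

def find_min_divisor_without_repeats (arr : List Int) : Int :=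
  pvALoop arr 2 (pvFuel arr)

-- ===== PORT B =====
-- nested loop building the set of pairwise absolute differences (arr[i+1:] = rest)
def pvBDiffs : List Int → PySem.Set Int → PySem.Set Int
  | [], diffs => diffs
  | x :: rest, diffs =>
      pvBDiffs rest (rest.foldl (fun s y => PySem.Set.add s |x - y|) diffs)

-- the `while any(...)` loop
def pvBLoop (diffs : PySem.Set Int) (d : Int) : Nat → Int
  | 0 => d
  | fuel + 1 =>
      if diffs.any (fun diff => PySem.Int.mod diff d == 0) then pvBLoop diffs (d + 1) fuel
      else d

def find_min_divisor_without_repeats_alt (arr : List Int) : Int :=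
  pvBLoop (pvBDiffs arr PySem.Set.empty) 2 (pvFuel arr)

-- ===== PRECONDITION & SPEC =====
def Spec_find_min_divisor_without_repeats (arr : List Int) (out : Int) : Prop := out = find_min_divisor_without_repeats_alt arr
instance (arr : List Int) (out : Int) : Decidable (Spec_find_min_divisor_without_repeats arr out) := by unfold Spec_find_min_divisor_without_repeats; infer_instance

-- ===== CLAIM (what is proved, stated in full; the proofs are below) =====
def Claim_equal_find_min_divisor_without_repeats : Prop := ∀ (arr : List Int), Dom_find_min_divisor_without_repeats arr → Spec_find_min_divisor_without_repeats arr (find_min_divisor_without_repeats arr)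

-- ===== LEMMAS AND PROOFS =====

-- ghost list of pairwise absolute differences (proof tool only)
def pvGDiffs : List Int → List Int
  | [] => []
  | x :: rest => rest.map (fun y => |x - y|) ++ pvGDiffs rest

theorem pvAInner_iff (l : List Int) (d : Int) :
    ∀ s : PySem.Set Int, pvAInner l d s = true ↔
      ((l.map (fun n => PySem.Int.mod n d)).Nodup ∧ ∀ n ∈ l, PySem.Int.mod n d ∉ s) := by
  induction l with
  | nil => intro s; simp [pvAInner]
  | cons x rest ih =>
      intro s
      simp only [pvAInner]
      cases hc : PySem.Set.contains s (PySem.Int.mod x d) with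
      | true =>
          have hx : PySem.Int.mod x d ∈ s := (PySem.Set.contains_iff _ _).1 hc
          constructor
          · intro h; exact absurd h (by simp)
          · rintro ⟨-, hall⟩
            exact absurd hx (hall x (List.mem_cons_self))
      | false =>
          have hx : PySem.Int.mod x d ∉ s := fun h => by
            rw [(PySem.Set.contains_iff _ _).2 h] at hc; cases hc
          simp only [Bool.false_eq_true, if_false]
          rw [ih]
          constructor
          · rintro ⟨hnd, hns⟩
            refine ⟨?_, ?_⟩
            · simp only [List.map_cons, List.nodup_cons]
              refine ⟨?_, hnd⟩
              intro hmem
              rcases List.mem_map.1 hmem with ⟨y, hy, hyeq⟩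
              have := hns y hy
              rw [hyeq] at this
              exact this (by simp [PySem.Set.mem_add])
            · intro n hn
              rcases List.mem_cons.1 hn with rfl | hn'
              · exact hx
              · intro hmem
                exact (hns n hn') (by simp [PySem.Set.mem_add, hmem])
          · rintro ⟨hnd, hns⟩
            simp only [List.map_cons, List.nodup_cons] at hnd
            refine ⟨hnd.2, ?_⟩
            intro n hn hmem
            rw [PySem.Set.mem_add] at hmem
            rcases hmem with hmem | hmem
            · exact hns n (List.mem_cons_of_mem _ hn) hmem
            · exact hnd.1 (List.mem_map.2 ⟨n, hn, hmem⟩)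

theorem pvFoldl_add_mem (g : Int → Int) (l : List Int) :
    ∀ (s : PySem.Set Int) (t : Int),
      (t ∈ l.foldl (fun s y => PySem.Set.add s (g y)) s) ↔ t ∈ s ∨ t ∈ l.map g := by
  induction l with
  | nil => intro s t; simp
  | cons y rest ih =>
      intro s t
      simp only [List.foldl_cons, List.map_cons, List.mem_cons]
      rw [ih]
      rw [PySem.Set.mem_add]
      tauto

theorem pvBDiffs_mem (l : List Int) :
    ∀ (s : PySem.Set Int) (t : Int), t ∈ pvBDiffs l s ↔ t ∈ s ∨ t ∈ pvGDiffs l := by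
  induction l with
  | nil => intro s t; simp [pvBDiffs, pvGDiffs]
  | cons x rest ih =>
      intro s t
      simp only [pvBDiffs, pvGDiffs, List.mem_append]
      rw [ih, pvFoldl_add_mem]
      tauto

theorem pvMod_diff_zero (d x y : Int) (hd : 0 < d) :
    PySem.Int.mod |x - y| d = 0 ↔ PySem.Int.mod x d = PySem.Int.mod y d := by
  rw [PySem.Int.mod_eq_zero_iff_dvd, dvd_abs,
      PySem.Int.mod_eq_emod_of_pos hd, PySem.Int.mod_eq_emod_of_pos hd,
      Int.emod_eq_emod_iff_emod_sub_eq_zero, PySem.Int.emod_eq_zero_iff_dvd]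

theorem pvNodup_iff_gdiffs (d : Int) (hd : 0 < d) (l : List Int) :
    (l.map (fun n => PySem.Int.mod n d)).Nodup ↔
      ∀ t ∈ pvGDiffs l, PySem.Int.mod t d ≠ 0 := by
  induction l with
  | nil => simp [pvGDiffs]
  | cons x rest ih =>
      simp only [List.map_cons, List.nodup_cons, pvGDiffs, List.mem_append]
      rw [ih]
      constructor
      · rintro ⟨hx, hrest⟩ t ht
        rcases ht with ht | ht
        · rcases List.mem_map.1 ht with ⟨y, hy, rfl⟩
          intro h0
          exact hx (List.mem_map.2 ⟨y, hy, ((pvMod_diff_zero d x y hd).1 h0).symm⟩)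
        · exact hrest t ht
      · intro h
        refine ⟨?_, fun t ht => h t (Or.inr ht)⟩
        intro hmem
        rcases List.mem_map.1 hmem with ⟨y, hy, hyeq⟩
        exact h _ (Or.inl (List.mem_map.2 ⟨y, hy, rfl⟩))
          ((pvMod_diff_zero d x y hd).2 hyeq.symm)

theorem pvCond_iff (arr : List Int) (d : Int) (hd : 0 < d) :
    pvAInner arr d PySem.Set.empty = true ↔
      (pvBDiffs arr PySem.Set.empty).any (fun diff => PySem.Int.mod diff d == 0) = false := by
  rw [pvAInner_iff]
  have hempty : ∀ n ∈ arr, PySem.Int.mod n d ∉ (PySem.Set.empty : PySem.Set Int) := by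
    intro n _ h; simp [PySem.Set.empty] at h
  constructor
  · rintro ⟨hnd, -⟩
    rw [List.any_eq_false]
    intro t ht
    have := (pvBDiffs_mem arr PySem.Set.empty t).1 ht
    simp only [PySem.Set.empty, List.not_mem_nil, false_or] at this
    simpa using (pvNodup_iff_gdiffs d hd arr).1 hnd t this
  · intro h
    refine ⟨(pvNodup_iff_gdiffs d hd arr).2 ?_, hempty⟩
    intro t ht
    have := List.any_eq_false.1 h t ((pvBDiffs_mem arr PySem.Set.empty t).2 (Or.inr ht))
    simpa using this
  
theorem pvLoop_eq (arr : List Int) :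
    ∀ (fuel : Nat) (d : Int), 0 < d →
      pvALoop arr d fuel = pvBLoop (pvBDiffs arr PySem.Set.empty) d fuel := by
  intro fuel
  induction fuel with
  | zero => intro d _; rfl
  | succ n ih =>
      intro d hd
      simp only [pvALoop, pvBLoop]
      by_cases h : pvAInner arr d PySem.Set.empty = true
      · have hb := (pvCond_iff arr d hd).1 h
        rw [if_pos h, if_neg (by rw [hb]; exact Bool.false_ne_true)]
      · have hany : (pvBDiffs arr PySem.Set.empty).any
            (fun diff => PySem.Int.mod diff d == 0) = true := by
          cases hh : (pvBDiffs arr PySem.Set.empty).any (fun diff => PySem.Int.mod diff d == 0)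
          · exact absurd ((pvCond_iff arr d hd).2 hh) h
          · rfl
        rw [if_neg h, if_pos hany]
        exact ih (d + 1) (by omega)

-- ===== VERDICT (by name: the statement is the Claim_ definition above) =====
theorem find_min_divisor_without_repeats_spec : Claim_equal_find_min_divisor_without_repeats := by
  intro arr _
  unfold Spec_find_min_divisor_without_repeats find_min_divisor_without_repeats find_min_divisor_without_repeats_alt
  exact pvLoop_eq arr (pvFuel arr) 2 (by omega)
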